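-- pv_equiv track=rewrite | github.com/milljohn/knight_travels | old/innerEdges.py | innerEdges
-- ===== SOURCE A (Python) =====
-- def innerEdges(n=8):
--     edges = []
--
--     for i in range(1, n + 1):
--         edges.append(i)
--         edges.append(i + n)
--
--     for i in range(n * n - n + 1, n * n + 1):
--         edges.append(i)
--         # edges.append(i - n)
--
--     for i in range(2, n):
--         edges.append((i - 1) * n + 1)
--         edges.append((i - 1) * n + 2)
--         edges.append(i * n - 1)
--         edges.append(i * n)
--     return sorted(edges)
-- ===== SOURCE B (Python) =====
-- def innerEdges(n=8):
--     # Generate the three boundary groups as already-sorted sequences, then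
--     # merge them in linear time (no comparison sort).
--     s1 = list(range(1, 2 * n + 1))              # rows 1 and 2, in order
--     s2 = list(range(n * n - n + 1, n * n + 1))  # last row, in order
--     s3 = []                                     # side cells of middle rows
--     for i in range(2, n):
--         s3 += [(i - 1) * n + 1, (i - 1) * n + 2, i * n - 1, i * n]
--     return _merge(_merge(s1, s3), s2)
--
--
-- def _merge(xs, ys):
--     out = []
--     i = j = 0
--     while i < len(xs) and j < len(ys):
--         if xs[i] <= ys[j]:
--             out.append(xs[i])
--             i += 1
--         else:
--             out.append(ys[j])
--             j += 1
--     out.extend(xs[i:])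
--     out.extend(ys[j:])
--     return out
-- ===== Notes on version B (the rewrite author's own statement) =====
-- stated objective: alternative
-- what changed: Instead of appending all three boundary groups into one list and comparison-sorting it, B emits each group as an already-sorted arithmetic sequence and combines them with a linear two-pointer merge (no sort).
import Mathlib
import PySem

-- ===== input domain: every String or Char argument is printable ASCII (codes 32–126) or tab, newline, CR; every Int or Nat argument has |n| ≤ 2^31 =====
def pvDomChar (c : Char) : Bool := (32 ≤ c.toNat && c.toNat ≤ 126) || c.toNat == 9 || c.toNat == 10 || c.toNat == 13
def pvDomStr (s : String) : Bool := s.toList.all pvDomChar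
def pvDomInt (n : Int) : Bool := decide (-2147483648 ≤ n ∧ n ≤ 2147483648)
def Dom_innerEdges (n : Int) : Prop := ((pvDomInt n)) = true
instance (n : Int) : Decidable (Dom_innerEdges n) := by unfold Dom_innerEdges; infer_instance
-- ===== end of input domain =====

-- B replaces A's "collect three index groups, then comparison-sort" by generating each
-- group as an already-sorted sequence and merging them linearly (objective: alternative).

-- ===== PORT A =====
def innerEdges (n : Int) : List Int :=
  let edges : List Int := []
  let edges := (PySem.List.pyRange 1 (n + 1) 1).foldl
    (fun acc i => acc ++ [i, i + n]) edges
  let edges := (PySem.List.pyRange (n * n - n + 1) (n * n + 1) 1).foldl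
    (fun acc i => acc ++ [i]) edges
  let edges := (PySem.List.pyRange 2 n 1).foldl
    (fun acc i => acc ++ [(i - 1) * n + 1, (i - 1) * n + 2, i * n - 1, i * n]) edges
  PySem.List.sorted edges (fun x => x) false

-- ===== PORT B =====
-- hand-written two-pointer merge of Source B, transcribed as structural recursion on the lists
def pvMerge : List Int → List Int → List Int
  | [], ys => ys
  | x :: xs, [] => x :: xs
  | x :: xs, y :: ys =>
    if x ≤ y then x :: pvMerge xs (y :: ys) else y :: pvMerge (x :: xs) ys

def innerEdges_alt (n : Int) : List Int :=
  let s1 := PySem.List.pyRange 1 (2 * n + 1) 1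
  let s2 := PySem.List.pyRange (n * n - n + 1) (n * n + 1) 1
  let s3 := (PySem.List.pyRange 2 n 1).foldl
    (fun acc i => acc ++ [(i - 1) * n + 1, (i - 1) * n + 2, i * n - 1, i * n]) []
  pvMerge (pvMerge s1 s3) s2

-- ===== PRECONDITION & SPEC =====
def Spec_innerEdges (n : Int) (out : List Int) : Prop := out = innerEdges_alt n
instance (n : Int) (out : List Int) : Decidable (Spec_innerEdges n out) := by unfold Spec_innerEdges; infer_instance

-- ===== CLAIM (what is proved, stated in full; the proofs are below) =====
def Claim_equal_innerEdges : Prop := ∀ (n : Int), Dom_innerEdges n → Spec_innerEdges n (innerEdges n)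

-- ===== LEMMAS AND PROOFS =====

theorem pvMerge_eq_merge (xs ys : List Int) : pvMerge xs ys = xs.merge ys (· ≤ ·) := by
  fun_induction pvMerge xs ys <;> simp_all

theorem pvMerge_perm (xs ys : List Int) : (pvMerge xs ys).Perm (xs ++ ys) := by
  rw [pvMerge_eq_merge]; exact List.merge_perm_append (fun x1 x2 => decide (x1 ≤ x2))

theorem pvMerge_pairwise {xs ys : List Int}
    (hx : xs.Pairwise (· ≤ ·)) (hy : ys.Pairwise (· ≤ ·)) :
    (pvMerge xs ys).Pairwise (· ≤ ·) := by
  rw [pvMerge_eq_merge]; exact List.Pairwise.merge hx hy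

-- the quadruple appended by A's third loop (and B's s3 loop) for row i
def pvQuad (n i : Int) : List Int := [(i - 1) * n + 1, (i - 1) * n + 2, i * n - 1, i * n]

theorem quad_pairwise (n : Int) (hn : 3 ≤ n) (a b : Int) :
    ((PySem.List.pyRange a b 1).flatMap (pvQuad n)).Pairwise (· ≤ ·) := by
  have key : ∀ k : Nat, ∀ a : Int, (b - a).toNat = k →
      ((PySem.List.pyRange a b 1).flatMap (pvQuad n)).Pairwise (· ≤ ·) := by
    intro k
    induction k with
    | zero => intro a hk; rw [PySem.List.pyRange_one_eq_nil (by omega)]; simp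
    | succ m ih =>
      intro a hk
      rw [PySem.List.pyRange_one_cons (by omega), List.flatMap_cons]
      apply List.pairwise_append.2
      refine ⟨?_, ih (a + 1) (by omega), ?_⟩
      · have e1 : (a - 1) * n = a * n - n := by ring
        simp only [pvQuad]
        refine List.pairwise_cons.2 ⟨?_, ?_⟩ <;> simp_all <;> omega
      · intro x hx y hy
        obtain ⟨j, hj, hyj⟩ := List.mem_flatMap.1 hy
        have hjb := PySem.List.mem_pyRange_one.1 hj
        have hmul : a * n ≤ (j - 1) * n :=
          mul_le_mul_of_nonneg_right (by omega) (by omega)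
        simp only [pvQuad, List.mem_cons, List.not_mem_nil, or_false] at hx hyj
        have e1 : (a - 1) * n = a * n - n := by ring
        have e2 : (j - 1) * n = j * n - n := by ring
        rcases hx with rfl|rfl|rfl|rfl <;> rcases hyj with rfl|rfl|rfl|rfl <;> omega
  exact key (b - a).toNat a rfl

theorem s3_pairwise (n : Int) :
    ((PySem.List.pyRange 2 n 1).flatMap (pvQuad n)).Pairwise (· ≤ ·) := by
  by_cases hn : 3 ≤ n
  · exact quad_pairwise n hn 2 n
  · rw [PySem.List.pyRange_one_eq_nil (by omega)]; simp

theorem flatMap_pair_perm (l : List Int) (f g : Int → Int) :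
    (l.flatMap (fun i => [f i, g i])).Perm (l.map f ++ l.map g) := by
  induction l with
  | nil => simp
  | cons a l ih =>
    simp only [List.flatMap_cons, List.map_cons, List.cons_append]
    refine (ih.cons (g a)).cons (f a) |>.trans ?_
    exact (List.Perm.cons (f a) List.perm_middle.symm)

theorem map_add_pyRange (a b c : Int) :
    (PySem.List.pyRange a b 1).map (fun i => i + c) = PySem.List.pyRange (a + c) (b + c) 1 := by
  rw [PySem.List.pyRange_one, PySem.List.pyRange_one, List.map_map]
  have : (b + c - (a + c)) = b - a := by ring
  rw [this]
  apply List.map_congr_left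
  intro k _
  simp only [Function.comp_apply]
  ring

theorem s1_perm (n : Int) :
    ((PySem.List.pyRange 1 (n + 1) 1).flatMap (fun i => [i, i + n])).Perm
      (PySem.List.pyRange 1 (2 * n + 1) 1) := by
  by_cases hn : 0 ≤ n
  · refine (flatMap_pair_perm _ (fun i => i) (fun i => i + n)).trans ?_
    rw [List.map_id', map_add_pyRange]
    rw [show (1 : Int) + n = n + 1 by ring, show n + 1 + n = 2 * n + 1 by ring,
      ← PySem.List.pyRange_one_append 1 (n + 1) (2 * n + 1) (by omega) (by omega)]
  · rw [PySem.List.pyRange_one_eq_nil (show n + 1 ≤ 1 by omega),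
      PySem.List.pyRange_one_eq_nil (show 2 * n + 1 ≤ 1 by omega)]
    simp

-- ===== VERDICT (by name: the statement is the Claim_ definition above) =====
theorem innerEdges_spec : Claim_equal_innerEdges := by
  intro n _
  unfold Spec_innerEdges innerEdges innerEdges_alt
  simp only [PySem.List.foldl_append_eq_flatMap, List.nil_append, List.flatMap_singleton']
  have hquad : (fun (i : Int) => [(i - 1) * n + 1, (i - 1) * n + 2, i * n - 1, i * n]) = pvQuad n := rfl
  rw [hquad]
  set s1 := PySem.List.pyRange 1 (2 * n + 1) 1 with hs1
  set s2 := PySem.List.pyRange (n * n - n + 1) (n * n + 1) 1 with hs2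
  set s3 := (PySem.List.pyRange 2 n 1).flatMap (pvQuad n) with hs3
  apply PySem.List.sorted_id_eq_of_perm_of_pairwise
  · -- permutation
    have h1 := (pvMerge_perm (pvMerge s1 s3) s2).trans
      ((pvMerge_perm s1 s3).append_right s2)
    have h2 := ((s1_perm n).symm.append_right s3).append_right s2
    have h3 : ((PySem.List.pyRange 1 (n + 1) 1).flatMap (fun i => [i, i + n]) ++ s3 ++ s2).Perm
        ((PySem.List.pyRange 1 (n + 1) 1).flatMap (fun i => [i, i + n]) ++ s2 ++ s3) := by
      rw [List.append_assoc, List.append_assoc]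
      exact List.Perm.append_left _ List.perm_append_comm
    exact h1.trans (h2.trans h3)
  · -- sortedness
    refine pvMerge_pairwise (pvMerge_pairwise ?_ ?_) ?_
    · exact (PySem.List.pairwise_lt_pyRange_one 1 (2 * n + 1)).imp le_of_lt
    · exact s3_pairwise n
    · exact (PySem.List.pairwise_lt_pyRange_one _ _).imp le_of_lt
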